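-- pv_equiv track=rewrite | github.com/cheuora/Vue_Analyzingcontext | backend/libs/checkParenthesis.py | countBetweenCondition
-- ===== SOURCE A (Python) =====
-- def countBetweenCondition(String):
--     #added MAY 2016
--     #return value --> [ count of ';', +1] : { ;;;;
--     #                 [ count of ';', 0 ] : ;;;;
--     #                 [ count of ';', -1 ] : ;;;; }
--     temp = []
--     temp_right = []
--     for i,value in enumerate(String):
--         if value == "{":
--             temp.append(i)
--         elif value == "}":
--             if len(temp) > 0 :
--                 temp.pop()
--             else :
--                 temp_right.append(i)
--
--     if len(temp) == 0 and len(temp_right) == 0: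
--         return [String.count(';'),0]
--     elif len(temp) > 0 and len(temp_right) == 0 :
--         return [String[:temp[0]].count(';'), 1]
--
--     elif len(temp) == 0 and len(temp_right) > 0 :
--         return [String.count(';'), -1]
-- ===== SOURCE B (Python) =====
-- def countBetweenCondition(String):
--     # Prefix-sum formulation: the numbers of unmatched braces are read off the
--     # running balance's minimum and final value; no brace-matching state machine.
--     pre = [0]
--     s = 0
--     for c in String:
--         s += 1 if c == '{' else -1 if c == '}' else 0
--         pre.append(s)
--     low = min(pre)
--     opens, closes = s - low, -low
--     if opens == 0:
--         return [String.count(';'), -1 if closes else 0]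
--     if closes == 0:
--         # first unmatched '{' = last '{' seen at balance 0
--         first = max(i for i, (c, p) in enumerate(zip(String, pre)) if c == '{' and p == 0)
--         return [String.count(';', 0, first), 1]
-- ===== Notes on version B (the rewrite author's own statement) =====
-- stated objective: alternative
-- what changed: Replaces A's brace-matching simulation (a stack of '{' indices and a list of unmatched '}' indices) by an arithmetic prefix-sum method: build the running-balance list once, read the unmatched counts off its minimum and final value, and recover the first unmatched '{' as the maximum index where the balance is zero at a '{' -- no matching or popping at all.
-- outside the precondition, e.g. on countBetweenCondition('}{'): A returns None, B returns None
import Mathlib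
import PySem

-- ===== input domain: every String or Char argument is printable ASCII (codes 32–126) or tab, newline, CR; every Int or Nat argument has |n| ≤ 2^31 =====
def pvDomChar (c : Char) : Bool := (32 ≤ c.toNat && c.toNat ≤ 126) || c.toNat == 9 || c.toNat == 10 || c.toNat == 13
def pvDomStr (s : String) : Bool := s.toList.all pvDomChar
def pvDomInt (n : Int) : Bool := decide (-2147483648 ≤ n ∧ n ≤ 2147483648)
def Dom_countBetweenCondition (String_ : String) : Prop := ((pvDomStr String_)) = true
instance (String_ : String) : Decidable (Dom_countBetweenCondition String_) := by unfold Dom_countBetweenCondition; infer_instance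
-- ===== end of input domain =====

-- B replaces A's brace-matching stack simulation by prefix-sum arithmetic: unmatched-brace counts come from the minimum and final value of the running balance, the first unmatched '{' from the maximum index with balance 0 at a '{'.


-- ===== PORT A =====
-- the loop body: push '{' index, pop on '}' (or record the '}' index when the stack is empty)
def pvStepA (st : List Int × List Int) (p : Int × Char) : List Int × List Int :=
  if p.2 = '{' then (st.1 ++ [p.1], st.2)
  else if p.2 = '}' then
    (if 0 < st.1.length then (st.1.dropLast, st.2) else (st.1, st.2 ++ [p.1]))
  else st

-- the four-way branch after the loop
def pvFinishA (cs : List Char) (st : List Int × List Int) : List Int :=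
  if st.1.length = 0 ∧ st.2.length = 0 then
    [(PySem.Chars.count cs [';'] : Int), 0]
  else if 0 < st.1.length ∧ st.2.length = 0 then
    (match st.1 with
     | t :: _ => [(PySem.Chars.count (PySem.List.slice cs none (some t)) [';'] : Int), 1]
     | [] => [])  -- unreachable: the guard says st.1 is nonempty
  else if st.1.length = 0 ∧ 0 < st.2.length then
    [(PySem.Chars.count cs [';'] : Int), -1]
  else []  -- Python falls through all branches and returns None here; excluded by Pre_

def countBetweenCondition (String_ : String) : List Int :=
  pvFinishA String_.toList
    ((PySem.List.enumerate String_.toList).foldl pvStepA ([], []))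

-- ===== PORT B =====
def countBetweenCondition_alt (String_ : String) : List Int :=
  let cs := String_.toList
  -- pre = [0]; s = 0; for c in String: s += (1|-1|0); pre.append(s)
  let st := cs.foldl (fun (st : List Int × Int) c =>
      let s := st.2 + (if c = '{' then (1 : Int) else if c = '}' then -1 else 0)
      (st.1 ++ [s], s)) ([0], 0)
  let pre := st.1
  let s := st.2
  let low := (PySem.List.min? pre (fun x => x)).getD 0  -- pre is never empty, so min() never raises
  let opens := s - low
  let closes := -low
  if opens = 0 then
    [(PySem.Chars.count cs [';'] : Int), if closes = 0 then 0 else -1]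
  else if closes = 0 then
    -- max(i for i,(c,p) in enumerate(zip(String, pre)) if c=='{' and p==0); nonempty in this branch
    let first := (PySem.List.max? (((PySem.List.enumerate (cs.zip pre)).filter
        (fun q => q.2.1 == '{' && q.2.2 == 0)).map (fun q => q.1)) (fun x => x)).getD 0
    [(PySem.Chars.count (PySem.List.slice cs (some 0) (some first)) [';'] : Int), 1]
  else []  -- Python B likewise falls through (None); excluded by Pre_

-- ===== PRECONDITION & SPEC =====
def pvBraceVal (c : Char) : Int := if c = '{' then 1 else if c = '}' then -1 else 0

-- Pre_ excludes the strings holding both an unmatched '}' and an unmatched '{' (some prefix has more '}'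
-- than '{' AND some suffix has more '{' than '}'): exactly on those, Python A falls through all branches
-- and returns None, which is not a value of the declared return type list[int].
def Pre_countBetweenCondition (String_ : String) : Prop :=
  ¬ ((∃ k ∈ List.range (String_.toList.length + 1), ((String_.toList.take k).map pvBraceVal).sum < 0)
   ∧ (∃ k ∈ List.range (String_.toList.length + 1), 0 < ((String_.toList.drop k).map pvBraceVal).sum))
instance (String_ : String) : Decidable (Pre_countBetweenCondition String_) := by
  unfold Pre_countBetweenCondition; infer_instance

def pvWitness_countBetweenCondition : String := "{a;}x;"

def Spec_countBetweenCondition (String_ : String) (out : List Int) : Prop := out = countBetweenCondition_alt String_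
instance (String_ : String) (out : List Int) : Decidable (Spec_countBetweenCondition String_ out) := by unfold Spec_countBetweenCondition; infer_instance

-- ===== CLAIM (what is proved, stated in full; the proofs are below) =====
def Claim_equal_countBetweenCondition : Prop := ∀ (String_ : String), Dom_countBetweenCondition String_ → Pre_countBetweenCondition String_ → Spec_countBetweenCondition String_ (countBetweenCondition String_)

-- ===== LEMMAS AND PROOFS =====

-- sum of brace values of a character list
def pvS (cs : List Char) : Int := (cs.map pvBraceVal).sum

-- maximum of pvS over all suffixes (drop k, 0 ≤ k ≤ length)
def pvP : List Char → Int
  | [] => 0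
  | c :: cs => max (pvBraceVal c + pvS cs) (pvP cs)

-- minimum of pvS over all prefixes (take k, 0 ≤ k ≤ length)
def pvLow : List Char → Int
  | [] => 0
  | c :: cs => min 0 (pvBraceVal c + pvLow cs)

-- the running-balance list (pvS of each prefix), started at s
def pvPre : List Char → Int → List Int
  | [], s => [s]
  | c :: cs, s => s :: pvPre cs (s + pvBraceVal c)

-- proof-only scalar state machine bridging A's stack fold and the prefix-sum quantities
def pvStepB (st : Int × Int × Int) (p : Int × Char) : Int × Int × Int :=
  if p.2 = '{' then (st.1 + 1, st.2.1, if st.1 = 0 then p.1 else st.2.2)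
  else if p.2 = '}' then
    (if 0 < st.1 then (st.1 - 1, st.2.1, st.2.2) else (st.1, st.2.1 + 1, st.2.2))
  else st

-- last index i whose character is '{' seen while the running balance (started at b) is 0
def pvLZ : List (Int × Char) → Int → Option Int
  | [], _ => none
  | p :: l, b =>
    match pvLZ l (b + pvBraceVal p.2) with
    | some x => some x
    | none => if p.2 = '{' ∧ b = 0 then some p.1 else none

lemma pvLZ_cons (p : Int × Char) (l : List (Int × Char)) (b : Int) :
    pvLZ (p :: l) b = match pvLZ l (b + pvBraceVal p.2) with
      | some x => some x
      | none => if p.2 = '{' ∧ b = 0 then some p.1 else none := rfl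

lemma pvS_cons (c : Char) (cs : List Char) : pvS (c :: cs) = pvBraceVal c + pvS cs := by
  simp [pvS]

lemma pvP_ge_S (cs : List Char) : pvS cs ≤ pvP cs := by
  cases cs with
  | nil => simp [pvS, pvP]
  | cons c cs => rw [pvS_cons]; exact le_max_left _ _

lemma pvP_nonneg (cs : List Char) : 0 ≤ pvP cs := by
  induction cs with
  | nil => simp [pvP]
  | cons c cs ih => exact le_trans ih (le_max_right _ _)

lemma pvP_spec (cs : List Char) (t : Int) :
    t < pvP cs ↔ ∃ k ≤ cs.length, t < pvS (cs.drop k) := by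
  induction cs generalizing t with
  | nil => simp [pvP, pvS]
  | cons c cs ih =>
    constructor
    · intro h
      rcases lt_max_iff.mp h with h | h
      · exact ⟨0, by simp, by rw [List.drop_zero, pvS_cons]; exact h⟩
      · rcases (ih t).mp h with ⟨k, hk, hlt⟩
        exact ⟨k + 1, by simp only [List.length_cons]; omega, by simpa using hlt⟩
    · rintro ⟨k, hk, hlt⟩
      cases k with
      | zero =>
        rw [List.drop_zero, pvS_cons] at hlt
        exact lt_max_iff.mpr (Or.inl hlt)
      | succ k =>
        simp only [List.length_cons] at hk
        exact lt_max_iff.mpr (Or.inr ((ih t).mpr ⟨k, by omega, by simpa using hlt⟩))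

lemma pvS_take_drop (cs : List Char) (k : Nat) :
    pvS (cs.take k) + pvS (cs.drop k) = pvS cs := by
  simp only [pvS, ← List.sum_append, ← List.map_append, List.take_append_drop]

lemma pvLow_eq (cs : List Char) : pvLow cs = pvS cs - pvP cs := by
  induction cs with
  | nil => simp [pvLow, pvS, pvP]
  | cons c cs ih =>
    have h := pvP_ge_S cs
    rw [pvLow, ih, pvS_cons, pvP]
    omega

-- A's fold and the scalar fold stay related: the two list lengths are the counters,
-- and the head of the stack is `f` whenever the stack is nonempty.
lemma pv_main (l : List (Int × Char)) :
    ∀ (temp tr : List Int) (b r f : Int),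
    (temp.length : Int) = b → (tr.length : Int) = r → (temp ≠ [] → temp.head? = some f) →
    ((l.foldl pvStepA (temp, tr)).1.length : Int) = (l.foldl pvStepB (b, r, f)).1 ∧
    ((l.foldl pvStepA (temp, tr)).2.length : Int) = (l.foldl pvStepB (b, r, f)).2.1 ∧
    ((l.foldl pvStepA (temp, tr)).1 ≠ [] →
      (l.foldl pvStepA (temp, tr)).1.head? = some (l.foldl pvStepB (b, r, f)).2.2) := by
  induction l with
  | nil => intro temp tr b r f h1 h2 h3; exact ⟨h1, h2, h3⟩
  | cons p l ih =>
    intro temp tr b r f h1 h2 h3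
    simp only [List.foldl_cons]
    by_cases hc1 : p.2 = '{'
    · simp only [pvStepA, pvStepB, hc1, reduceIte]
      apply ih
      · simpa using h1
      · exact h2
      · intro _
        cases temp with
        | nil =>
          have hb : b = 0 := by simpa using h1.symm
          simp [hb]
        | cons a ts =>
          have hb : ¬ b = 0 := by
            rw [← h1]; simp only [List.length_cons]; push_cast; omega
          rw [if_neg hb]
          simpa using h3 (by simp)
    · by_cases hc2 : p.2 = '}'
      · simp only [pvStepA, pvStepB, hc1, hc2, reduceIte]
        by_cases hpos : 0 < temp.length
        · have hbpos : 0 < b := by omega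
          rw [if_pos hpos, if_pos hbpos]
          apply ih
          · simp only [List.length_dropLast]; push_cast; omega
          · exact h2
          · intro hne
            cases temp with
            | nil => simp at hpos
            | cons a ts =>
              cases ts with
              | nil => simp at hne
              | cons y ys =>
                have hdl : (a :: y :: ys).dropLast = a :: (y :: ys).dropLast := by simp
                rw [hdl] at hne ⊢
                simpa using h3 (by simp)
        · have hb0 : ¬ 0 < b := by omega
          rw [if_neg hpos, if_neg hb0]
          apply ih
          · exact h1
          · simp only [List.length_append, List.length_cons, List.length_nil]; omega
          · exact h3
      · simp only [pvStepA, pvStepB, hc1, hc2, reduceIte]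
        exact ih temp tr b r f h1 h2 h3

-- the scalar balance/right counters computed in closed form (clamped walk)
lemma pv_walk (l : List (Int × Char)) :
    ∀ (b r f : Int), 0 ≤ b →
    (l.foldl pvStepB (b, r, f)).1 = max (b + pvS (l.map Prod.snd)) (pvP (l.map Prod.snd)) ∧
    (l.foldl pvStepB (b, r, f)).2.1
      = r + (l.foldl pvStepB (b, r, f)).1 - b - pvS (l.map Prod.snd) := by
  induction l with
  | nil =>
    intro b r f hb
    constructor
    · simp [pvS, pvP]; omega
    · simp [pvS]
  | cons p l ih =>
    intro b r f hb
    have hPS := pvP_ge_S (l.map Prod.snd)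
    simp only [List.foldl_cons, List.map_cons]
    by_cases hc1 : p.2 = '{'
    · simp only [pvStepB, hc1, reduceIte]
      obtain ⟨e1, e2⟩ := ih (b + 1) r (if b = 0 then p.1 else f) (by omega)
      refine ⟨?_, ?_⟩
      · rw [e1, pvP, pvS_cons]; simp only [pvBraceVal, hc1, reduceIte]; omega
      · rw [e2, e1, pvS_cons]; simp only [pvBraceVal, hc1, reduceIte]; omega
    · by_cases hc2 : p.2 = '}'
      · by_cases hpos : 0 < b
        · have hstep : pvStepB (b, r, f) p = (b - 1, r, f) := by
            simp [pvStepB, hc1, hc2, hpos]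
          rw [hstep]
          have hv : pvBraceVal p.2 = -1 := by simp [pvBraceVal, hc1, hc2]
          obtain ⟨e1, e2⟩ := ih (b - 1) r f (by omega)
          refine ⟨?_, ?_⟩
          · rw [e1, pvP, pvS_cons, hv]; omega
          · rw [e2, e1, pvS_cons, hv]; omega
        · have hb0 : b = 0 := by omega
          have hstep : pvStepB (b, r, f) p = (b, r + 1, f) := by
            simp [pvStepB, hc1, hc2, hpos]
          rw [hstep]
          have hv : pvBraceVal p.2 = -1 := by simp [pvBraceVal, hc1, hc2]
          obtain ⟨e1, e2⟩ := ih b (r + 1) f hb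
          refine ⟨?_, ?_⟩
          · rw [e1, pvP, pvS_cons, hv, hb0]; omega
          · rw [e2, e1, pvS_cons, hv, hb0]; omega
      · simp only [pvStepB, hc1, hc2, reduceIte]
        obtain ⟨e1, e2⟩ := ih b r f hb
        refine ⟨?_, ?_⟩
        · rw [e1, pvP, pvS_cons]; simp only [pvBraceVal, hc1, hc2, reduceIte]; omega
        · rw [e2, e1, pvS_cons]; simp only [pvBraceVal, hc1, hc2, reduceIte]; omega

lemma pvPre_head (cs : List Char) (s : Int) : pvPre cs s = s :: (pvPre cs s).tail := by
  cases cs <;> rfl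

-- B's scan loop builds exactly the prefix-balance list
lemma pv_scan (cs : List Char) :
    ∀ (acc : List Int) (s : Int),
    cs.foldl (fun (st : List Int × Int) c =>
      let s := st.2 + (if c = '{' then (1 : Int) else if c = '}' then -1 else 0)
      (st.1 ++ [s], s)) (acc, s) = (acc ++ (pvPre cs s).tail, s + pvS cs) := by
  induction cs with
  | nil => intro acc s; simp [pvS, pvPre]
  | cons c cs ih =>
    intro acc s
    simp only [List.foldl_cons]
    rw [ih]
    have hv : s + (if c = '{' then (1 : Int) else if c = '}' then -1 else 0)
        = s + pvBraceVal c := rfl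
    refine Prod.ext ?_ ?_
    · show (acc ++ [s + _]) ++ (pvPre cs (s + _)).tail = acc ++ (pvPre (c :: cs) s).tail
      rw [hv, List.append_assoc]
      show acc ++ ([s + pvBraceVal c] ++ (pvPre cs (s + pvBraceVal c)).tail) = _
      rw [List.singleton_append, ← pvPre_head]
      rfl
    · show s + _ + pvS cs = s + pvS (c :: cs)
      rw [hv, pvS_cons]; ring

lemma pvLow_nonpos (cs : List Char) : pvLow cs ≤ 0 := by
  cases cs with
  | nil => simp [pvLow]
  | cons c cs => exact min_le_left _ _

lemma pv_foldl_min (cs : List Char) :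
    ∀ (s x : Int), (pvPre cs s).foldl min x = min x (s + pvLow cs) := by
  induction cs with
  | nil => intro s x; simp [pvPre, pvLow]
  | cons c cs ih =>
    intro s x
    show ((s :: pvPre cs (s + pvBraceVal c)).foldl min x) = _
    rw [List.foldl_cons, ih]
    rw [pvLow]
    omega

lemma pv_min (cs : List Char) (s : Int) :
    PySem.List.min? (pvPre cs s) (fun x => x) = some (s + pvLow cs) := by
  rw [pvPre_head cs s, PySem.List.min?_id_cons]
  congr 1
  have h : (pvPre cs s).foldl min s = min s (s + pvLow cs) := pv_foldl_min cs s s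
  rw [pvPre_head cs s, List.foldl_cons, min_self] at h
  rw [h]
  have := pvLow_nonpos cs
  omega

-- the right-counter only ever grows along the scalar fold
lemma pv_r_mono (l : List (Int × Char)) :
    ∀ (st : Int × Int × Int), st.2.1 ≤ (l.foldl pvStepB st).2.1 := by
  induction l with
  | nil => intro st; simp
  | cons p l ih =>
    intro st
    simp only [List.foldl_cons]
    refine le_trans ?_ (ih (pvStepB st p))
    unfold pvStepB
    split_ifs <;> simp

-- under no clamps (final r = initial r), the tracked index f is pvLZ
lemma pv_first (l : List (Int × Char)) :
    ∀ (b r f : Int), 0 ≤ b → (l.foldl pvStepB (b, r, f)).2.1 = r →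
    (l.foldl pvStepB (b, r, f)).2.2 = (pvLZ l b).getD f := by
  induction l with
  | nil => intro b r f _ _; simp [pvLZ]
  | cons p l ih =>
    intro b r f hb hr
    simp only [List.foldl_cons] at hr ⊢
    by_cases hc1 : p.2 = '{'
    · have hstep : pvStepB (b, r, f) p = (b + 1, r, if b = 0 then p.1 else f) := by
        simp [pvStepB, hc1]
      rw [hstep] at hr ⊢
      have hv : pvBraceVal p.2 = 1 := by simp [pvBraceVal, hc1]
      rw [ih (b + 1) r (if b = 0 then p.1 else f) (by omega) hr, pvLZ_cons, hv]
      cases hLZ : pvLZ l (b + 1) with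
      | some x => simp
      | none =>
        by_cases hb0 : b = 0 <;> simp [hb0, hc1]
    · by_cases hc2 : p.2 = '}'
      · have hv : pvBraceVal p.2 = -1 := by simp [pvBraceVal, hc1, hc2]
        by_cases hpos : 0 < b
        · have hstep : pvStepB (b, r, f) p = (b - 1, r, f) := by
            simp [pvStepB, hc1, hc2, hpos]
          rw [hstep] at hr ⊢
          rw [ih (b - 1) r f (by omega) hr, pvLZ_cons, hv]
          have he : b + -1 = b - 1 := by omega
          rw [he]
          cases pvLZ l (b - 1) with
          | some x => simp
          | none => simp [hc1]
        · exfalso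
          have hstep : pvStepB (b, r, f) p = (b, r + 1, f) := by
            simp [pvStepB, hc1, hc2, hpos]
          rw [hstep] at hr
          have := pv_r_mono l (b, r + 1, f)
          simp only at this
          omega
      · have hstep : pvStepB (b, r, f) p = (b, r, f) := by
          simp [pvStepB, hc1, hc2]
        rw [hstep] at hr ⊢
        rw [ih b r f hb hr, pvLZ_cons]
        have hv : pvBraceVal p.2 = 0 := by simp [pvBraceVal, hc1, hc2]
        rw [hv, add_zero]
        cases pvLZ l b with
        | some x => simp
        | none => simp [hc1]

-- a none pvLZ keeps a nonpositive balance nonpositive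
lemma pvLZ_none (l : List (Int × Char)) :
    ∀ (b : Int), b ≤ 0 → pvLZ l b = none → b + pvS (l.map Prod.snd) ≤ 0 := by
  induction l with
  | nil => intro b hb _; simpa [pvS] using hb
  | cons p l ih =>
    intro b hb h
    rw [pvLZ_cons] at h
    simp only [List.map_cons, pvS_cons]
    cases hLZ : pvLZ l (b + pvBraceVal p.2) with
    | some x => rw [hLZ] at h; simp at h
    | none =>
      rw [hLZ] at h
      by_cases hc1 : p.2 = '{'
      · have hb0 : b ≠ 0 := by
          intro hb0
          rw [if_pos ⟨hc1, hb0⟩] at h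
          simp at h
        have hv : pvBraceVal p.2 = 1 := by simp [pvBraceVal, hc1]
        have := ih (b + pvBraceVal p.2) (by rw [hv]; omega) hLZ
        omega
      · have hv : pvBraceVal p.2 ≤ 0 := by
          simp only [pvBraceVal, hc1, if_false]
          split_ifs <;> omega
        have := ih (b + pvBraceVal p.2) (by omega) hLZ
        omega

lemma pv_enum_fst_ge {α : Type} (l : List α) (i0 : Int) :
    ∀ p ∈ PySem.List.enumerate l i0, i0 ≤ p.1 := by
  intro p hp
  rcases (PySem.List.mem_enumerate_iff l i0 p).mp hp with ⟨k, hk, rfl⟩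
  simp only
  omega

-- B's filtered max over the zipped balance list IS pvLZ
lemma pv_maxfilter (cs : List Char) :
    ∀ (i0 b : Int),
    PySem.List.max? (((PySem.List.enumerate (cs.zip (pvPre cs b)) i0).filter
        (fun q => q.2.1 == '{' && q.2.2 == 0)).map (fun q => q.1)) (fun x => x)
      = pvLZ (PySem.List.enumerate cs i0) b := by
  induction cs with
  | nil =>
    intro i0 b
    simp [PySem.List.enumerate_nil, pvLZ]
  | cons c cs ih =>
    intro i0 b
    have hzip : (c :: cs).zip (pvPre (c :: cs) b)
        = (c, b) :: cs.zip (pvPre cs (b + pvBraceVal c)) := rfl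
    rw [hzip, PySem.List.enumerate_cons, PySem.List.enumerate_cons, pvLZ_cons]
    rw [List.filter_cons]
    by_cases hcond : c = '{' ∧ b = 0
    · have hbt : ((((i0, c, b) : Int × Char × Int).2.1 == '{') && ((i0, c, b).2.2 == 0)) = true := by
        simp [hcond.1, hcond.2]
      rw [if_pos hbt, List.map_cons]
      rw [PySem.List.max?_id_cons]
      have hIH := ih (i0 + 1) (b + pvBraceVal c)
      cases hF : ((PySem.List.enumerate (cs.zip (pvPre cs (b + pvBraceVal c))) (i0 + 1)).filter
          (fun q => q.2.1 == '{' && q.2.2 == 0)).map (fun q => q.1) with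
      | nil =>
        rw [hF] at hIH
        have hnone : pvLZ (PySem.List.enumerate cs (i0 + 1)) (b + pvBraceVal c) = none := by
          rw [← hIH]; simp [PySem.List.max?_eq_none_iff]
        rw [hnone]
        simp [hcond.1, hcond.2]
      | cons y ys =>
        have hy : i0 ≤ y := by
          have : y ∈ ((PySem.List.enumerate (cs.zip (pvPre cs (b + pvBraceVal c))) (i0 + 1)).filter
              (fun q => q.2.1 == '{' && q.2.2 == 0)).map (fun q => q.1) := by
            rw [hF]; simp
          rcases List.mem_map.mp this with ⟨q, hq, rfl⟩
          have := pv_enum_fst_ge _ (i0 + 1) q (List.mem_of_mem_filter hq)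
          omega
        rw [hF] at hIH
        rw [PySem.List.max?_id_cons] at hIH
        rw [← hIH]
        simp only [List.foldl_cons]
        rw [max_eq_right hy]
    · have hbt : ((((i0, c, b) : Int × Char × Int).2.1 == '{') && ((i0, c, b).2.2 == 0)) = false := by
        by_cases h1 : c = '{'
        · have h2 : b ≠ 0 := fun h2 => hcond ⟨h1, h2⟩
          simp [h1, h2]
        · simp [h1]
      rw [if_neg (by simp [hbt])]
      rw [ih (i0 + 1) (b + pvBraceVal c)]
      cases pvLZ (PySem.List.enumerate cs (i0 + 1)) (b + pvBraceVal c) with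
      | some x => rfl
      | none => simp [hcond]

-- ===== VERDICT (by name: the statement is the Claim_ definition above) =====
theorem countBetweenCondition_spec : Claim_equal_countBetweenCondition := by
  intro s _ hPre
  unfold Spec_countBetweenCondition countBetweenCondition countBetweenCondition_alt
  set cs := s.toList with hcs
  -- B's scan loop produces the prefix-balance list and its final sum
  have hpre0 : [(0 : Int)] ++ (pvPre cs 0).tail = pvPre cs 0 := by
    conv_rhs => rw [pvPre_head cs 0]
    simp
  have hscan := pv_scan cs [0] 0
  rw [hpre0, zero_add] at hscan
  simp only [hscan, pv_min cs 0, Option.getD_some, zero_add, pvLow_eq]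
  have ho : pvS cs - (pvS cs - pvP cs) = pvP cs := by ring
  have hc : -(pvS cs - pvP cs) = pvP cs - pvS cs := by ring
  rw [ho, hc]
  -- A's fold related to the scalar machine, and the scalar machine in closed form
  obtain ⟨h1, h2, h3⟩ :=
    pv_main (PySem.List.enumerate cs 0) [] [] 0 0 (-1) (by simp) (by simp) (by simp)
  obtain ⟨w1, w2⟩ := pv_walk (PySem.List.enumerate cs 0) 0 0 (-1) le_rfl
  have hsnd : (PySem.List.enumerate cs 0).map Prod.snd = cs := by
    simpa using PySem.List.map_snd_enumerate cs 0
  rw [hsnd] at w1 w2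
  have hbal : ((PySem.List.enumerate cs 0).foldl pvStepB (0, 0, -1)).1 = pvP cs := by
    rw [w1, zero_add, max_eq_right (pvP_ge_S cs)]
  have hright : ((PySem.List.enumerate cs 0).foldl pvStepB (0, 0, -1)).2.1 = pvP cs - pvS cs := by
    rw [w2, hbal]; ring
  rw [hbal] at h1
  rw [hright] at h2
  by_cases hop : pvP cs = 0
  · -- opens = 0: A's stack is empty
    have hlen1 : ((PySem.List.enumerate cs 0).foldl pvStepA ([], [])).1.length = 0 := by
      omega
    by_cases hcl : pvP cs - pvS cs = 0
    · have hlen2 : ((PySem.List.enumerate cs 0).foldl pvStepA ([], [])).2.length = 0 := by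
        omega
      rw [pvFinishA, if_pos ⟨hlen1, hlen2⟩, if_pos hop, if_pos hcl]
    · have hlen2 : 0 < ((PySem.List.enumerate cs 0).foldl pvStepA ([], [])).2.length := by
        omega
      rw [pvFinishA, if_neg (by omega), if_neg (by omega), if_pos ⟨hlen1, hlen2⟩,
        if_pos hop, if_neg hcl]
  · have hoppos : 0 < pvP cs := lt_of_le_of_ne (pvP_nonneg cs) (Ne.symm hop)
    by_cases hcl : pvP cs - pvS cs = 0
    · -- opens > 0, closes = 0: the slice branch
      have hlen1 : 0 < ((PySem.List.enumerate cs 0).foldl pvStepA ([], [])).1.length := by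
        omega
      have hlen2 : ((PySem.List.enumerate cs 0).foldl pvStepA ([], [])).2.length = 0 := by
        omega
      have hf := pv_first (PySem.List.enumerate cs 0) 0 0 (-1) le_rfl (by rw [hright, hcl])
      have hSpos : 0 < pvS cs := by omega
      have hsome : pvLZ (PySem.List.enumerate cs 0) 0 ≠ none := by
        intro hnone
        have := pvLZ_none (PySem.List.enumerate cs 0) 0 le_rfl hnone
        rw [hsnd] at this
        omega
      cases hLZ : pvLZ (PySem.List.enumerate cs 0) 0 with
      | none => exact absurd hLZ hsome
      | some k =>
        rw [hLZ] at hf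
        simp only [Option.getD_some] at hf
        have hhead := h3 (by intro h; rw [h] at hlen1; simp at hlen1)
        rw [hf] at hhead
        rw [pvFinishA, if_neg (by omega), if_pos ⟨hlen1, hlen2⟩]
        rw [if_neg hop, if_pos hcl]
        rw [pv_maxfilter cs 0 0, hLZ]
        simp only [Option.getD_some]
        cases htemp : ((PySem.List.enumerate cs 0).foldl pvStepA ([], [])).1 with
        | nil => rw [htemp] at hlen1; simp at hlen1
        | cons t ts =>
          rw [htemp] at hhead
          simp only [List.head?_cons, Option.some.injEq] at hhead
          rw [hhead]
          rw [PySem.List.slice_zero_start]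
    · -- opens > 0 and closes > 0: excluded by Pre_
      exfalso
      apply hPre
      rw [← hcs]
      constructor
      · have hlt : pvS cs < pvP cs := by omega
        obtain ⟨k, hk, hgt⟩ := (pvP_spec cs (pvS cs)).mp hlt
        refine ⟨k, List.mem_range.mpr (by omega), ?_⟩
        have hsplit := pvS_take_drop cs k
        simp only [pvS] at hsplit hgt ⊢
        omega
      · obtain ⟨k, hk, hgt⟩ := (pvP_spec cs 0).mp hoppos
        exact ⟨k, List.mem_range.mpr (by omega), by simpa [pvS] using hgt⟩
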